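-- pv_equiv track=rewrite | github.com/scmbuildrelease/gitfusionsrc | libexec/p4gf_p4filetype.py | to_base_mods
-- ===== SOURCE A (Python) =====
-- ALIASES = {
-- 	      'ctempobj' : ['binary',    'S', 'w'       ]
-- 	    , 'ctext'    : ['text',      'C'            ]
-- 	    , 'cxtext'   : ['text',      'C', 'x'       ]
-- 	    , 'ktext'    : ['text',      'k'            ]
-- 	    , 'kxtext'   : ['text',      'k', 'x'       ]
-- 	    , 'ltext'    : ['text',      'F'            ]
-- 	    , 'tempobj'  : ['binary',    'F', 'S', 'w'  ]
-- 	    , 'ubinary'  : ['binary',    'F'            ]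
-- 	    , 'uresource': ['resource',  'F'            ]
-- 	    , 'uxbinary' : ['binary',    'F', 'x'       ]
-- 	    , 'xbinary'  : ['binary',    'x'            ]
-- 	    , 'xltext'   : ['text',      'F', 'x'       ]
-- 	    , 'xtempobj' : ['binary',    'S', 'w', 'x'  ]
-- 	    , 'xtext'    : ['text',      'x'            ]
-- 	    , 'xunicode' : ['unicode',   'x'            ]
-- 	    , 'xutf16'   : ['utf16',     'x'            ]
-- 	    , 'xutf8'    : ['utf8',      'x'            ]
--         }
--
-- def to_base_mods(filetype):
--     """Split a string p4filetype like "xtext" into an array of 2+ strings.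
--
--     'text'      => ['text', '' ]
--     "xtext"     => ['text', 'x']
--     "+x"        => ['',     'x']
--     "ktext+S10" => ['text', 'k', 'S', '1', '0']
--
--     Invalid filetypes produce undefined results.
--
--     Multi-char filetypes like +S1 become multiple elements in the returned list.
--     """
--
--     # +S<n> works only because we tear down and rebuild our + mod chars in
--     # the same sequence. We actually treat +S10 as +S +1 +0, then rebuild
--     # that to +S10 and it just works. Phew.
--
--     # Just in case we got 'xtext+k', split off any previous mods.
--     base_mod = filetype.split('+')
--     # convert the string values in a (possible empty) subarray to array of chars
--     mods = list(''.join(base_mod[1:]))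
--     base = base_mod[0]
--     if mods:
--         # Try again with just the base.
--         base_mod = to_base_mods(base)
--         if base_mod[1]:
--             mods += base_mod[1:]
--             base = base_mod[0]
--
--     if base in ALIASES:
--         x = ALIASES[base]
--         base = x[0]
--         if mods:
--             mods += x[1:]
--         else:
--             mods = x[1:]
--
--                         # Re-combine 'S' '1' '0' into 'S10"
--     if 'S' in mods:
--         i = mods.index('S')
--         while i + 1 < len(mods) and mods[i + 1] in "0123456789":
--             mods[i] += mods.pop(i + 1)
--
--                         # Re-combine 'k' 'o' into 'ko"
--     if 'k' in mods:
--         i = mods.index('k')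
--         if i + 1 < len(mods) and mods[i + 1] == 'o':
--             mods[i] += mods.pop(i + 1)
--
--     if mods:
--         return [base] + mods
--     else:
--         return [base, '']
-- ===== SOURCE B (Python) =====
-- ALIASES = {
-- 	      'ctempobj' : ['binary',    'S', 'w'       ]
-- 	    , 'ctext'    : ['text',      'C'            ]
-- 	    , 'cxtext'   : ['text',      'C', 'x'       ]
-- 	    , 'ktext'    : ['text',      'k'            ]
-- 	    , 'kxtext'   : ['text',      'k', 'x'       ]
-- 	    , 'ltext'    : ['text',      'F'            ]
-- 	    , 'tempobj'  : ['binary',    'F', 'S', 'w'  ]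
-- 	    , 'ubinary'  : ['binary',    'F'            ]
-- 	    , 'uresource': ['resource',  'F'            ]
-- 	    , 'uxbinary' : ['binary',    'F', 'x'       ]
-- 	    , 'xbinary'  : ['binary',    'x'            ]
-- 	    , 'xltext'   : ['text',      'F', 'x'       ]
-- 	    , 'xtempobj' : ['binary',    'S', 'w', 'x'  ]
-- 	    , 'xtext'    : ['text',      'x'            ]
-- 	    , 'xunicode' : ['unicode',   'x'            ]
-- 	    , 'xutf16'   : ['utf16',     'x'            ]
-- 	    , 'xutf8'    : ['utf8',      'x'            ]
--         }
--
--
-- def _absorb(mods, key, can_follow, at_most_one):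
--     """Merge the first occurrence of `key` with the following elements it
--     absorbs (a greedy run, or at most one element when at_most_one)."""
--     if key not in mods:
--         return mods
--     i = mods.index(key)
--     run = []
--     for e in mods[i + 1:]:
--         if not can_follow(e):
--             break
--         run.append(e)
--         if at_most_one:
--             break
--     j = i + 1 + len(run)
--     return mods[:i] + [''.join(mods[i:j])] + mods[j:]
--
--
-- def to_base_mods(filetype):
--     """Split a p4 filetype string into [base] + modifier chars (non-recursive)."""
--     parts = filetype.split('+')
--     base = parts[0]
--     mods = list(''.join(parts[1:]))
--     if base in ALIASES:
--         x = ALIASES[base]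
--         base = x[0]
--         mods = mods + x[1:]
--     mods = _absorb(mods, 'S', lambda e: e in '0123456789', False)
--     mods = _absorb(mods, 'k', lambda e: e == 'o', True)
--     return [base] + (mods if mods else [''])
-- ===== Notes on version B (the rewrite author's own statement) =====
-- stated objective: simpler
-- what changed: B removes A's recursive self-call (the alias is resolved by one direct ALIASES lookup, whose result needs no re-parsing) and replaces the two mutating index/pop recombination loops by a single slice-based helper that merges the first marker element with the run of elements it absorbs.
import Mathlib
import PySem

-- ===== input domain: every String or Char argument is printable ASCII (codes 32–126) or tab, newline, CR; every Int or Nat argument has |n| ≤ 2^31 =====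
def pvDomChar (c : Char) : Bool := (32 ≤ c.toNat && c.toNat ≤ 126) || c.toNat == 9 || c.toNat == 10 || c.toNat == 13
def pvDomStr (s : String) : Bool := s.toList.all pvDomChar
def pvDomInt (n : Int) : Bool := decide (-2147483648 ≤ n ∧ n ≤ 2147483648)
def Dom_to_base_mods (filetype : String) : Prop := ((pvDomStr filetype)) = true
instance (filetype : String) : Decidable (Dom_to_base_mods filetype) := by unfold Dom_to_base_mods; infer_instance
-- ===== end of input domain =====

-- B replaces A's recursive self-call with a single direct alias lookup and the two
-- index/pop recombination loops with one slice-based "absorb first key's run" helper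
-- (objective: simpler).

-- ===== PORT A =====

-- the ALIASES table, shared verbatim by both Pythons (keys/values as char lists)
def pvAliases : PySem.Dict (List Char) (List (List Char)) :=
  PySem.Dict.ofList
    [ ("ctempobj".toList , ["binary".toList,   "S".toList, "w".toList])
    , ("ctext".toList    , ["text".toList,     "C".toList])
    , ("cxtext".toList   , ["text".toList,     "C".toList, "x".toList])
    , ("ktext".toList    , ["text".toList,     "k".toList])
    , ("kxtext".toList   , ["text".toList,     "k".toList, "x".toList])
    , ("ltext".toList    , ["text".toList,     "F".toList])
    , ("tempobj".toList  , ["binary".toList,   "F".toList, "S".toList, "w".toList])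
    , ("ubinary".toList  , ["binary".toList,   "F".toList])
    , ("uresource".toList, ["resource".toList, "F".toList])
    , ("uxbinary".toList , ["binary".toList,   "F".toList, "x".toList])
    , ("xbinary".toList  , ["binary".toList,   "x".toList])
    , ("xltext".toList   , ["text".toList,     "F".toList, "x".toList])
    , ("xtempobj".toList , ["binary".toList,   "S".toList, "w".toList, "x".toList])
    , ("xtext".toList    , ["text".toList,     "x".toList])
    , ("xunicode".toList , ["unicode".toList,  "x".toList])
    , ("xutf16".toList   , ["utf16".toList,    "x".toList])
    , ("xutf8".toList    , ["utf8".toList,     "x".toList]) ]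

-- `e in "0123456789"` (Python substring membership), the test both Pythons use
def pvDigit (e : List Char) : Bool := PySem.Chars.isIn e ("0123456789".toList)

-- A's while loop: `while i+1 < len(mods) and mods[i+1] in "0123456789": mods[i] += mods.pop(i+1)`
-- (fuel makes the loop structural; each iteration shortens mods, so mods.length fuel suffices)
def pvLoopS : Nat → Nat → List (List Char) → List (List Char)
  | 0, _, mods => mods
  | fuel+1, i, mods =>
    if i + 1 < mods.length ∧ pvDigit (mods.getD (i+1) []) = true then
      pvLoopS fuel i ((mods.set i (mods.getD i [] ++ mods.getD (i+1) [])).eraseIdx (i+1))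
    else mods

-- A's `if 'S' in mods: i = mods.index('S'); <loop>`
def pvSStep (mods : List (List Char)) : List (List Char) :=
  match PySem.List.index? mods ("S".toList) with
  | some i => pvLoopS mods.length i mods
  | none => mods

-- A's `if 'k' in mods: i = mods.index('k'); if i+1 < len(mods) and mods[i+1] == 'o': mods[i] += mods.pop(i+1)`
def pvKStep (mods : List (List Char)) : List (List Char) :=
  match PySem.List.index? mods ("k".toList) with
  | some i =>
    if i + 1 < mods.length ∧ mods.getD (i+1) [] = "o".toList then
      (mods.set i (mods.getD i [] ++ mods.getD (i+1) [])).eraseIdx (i+1)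
    else mods
  | none => mods

-- structural model of `s.split('+')`, used only to justify termination of A's recursion
def pvSplitP (pre : List Char) : List Char → List (List Char)
  | [] => [pre]
  | c :: rest => if c = '+' then pre :: pvSplitP [] rest else pvSplitP (pre ++ [c]) rest

theorem pvSplitP_go (l : List Char) : ∀ fuel, l.length ≤ fuel → ∀ cur acc,
    PySem.Chars.splitOn.go ['+'] fuel l cur acc = acc.reverse ++ pvSplitP cur.reverse l := by
  induction l with
  | nil =>
    intro fuel _ cur acc
    cases fuel <;> simp [PySem.Chars.splitOn.go, pvSplitP]
  | cons c rest ih =>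
    intro fuel hf cur acc
    cases fuel with
    | zero => simp at hf
    | succ f =>
      simp only [PySem.Chars.splitOn.go]
      by_cases hc : c = '+'
      · subst hc
        rw [if_pos (by simp [List.isPrefixOf])]
        rw [show List.drop ['+'].length ('+' :: rest) = rest from rfl]
        rw [ih f (by simp at hf; omega)]
        simp [pvSplitP]
      · rw [if_neg (by simp [List.isPrefixOf]; exact fun h => hc h.symm)]
        rw [ih f (by simp at hf; omega)]
        simp [pvSplitP, hc]

theorem pvSplitOn_eq (cs : List Char) :
    PySem.Chars.splitOn cs ['+'] = pvSplitP [] cs := by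
  rw [PySem.Chars.splitOn, pvSplitP_go cs (cs.length + 1) (by omega)]
  simp

theorem pvSplitP_eq (pre : List Char) (l : List Char) :
    pvSplitP pre l = (pre ++ l.takeWhile (· ≠ '+')) ::
      (match l.dropWhile (· ≠ '+') with
       | [] => []
       | _ :: rest => pvSplitP [] rest) := by
  induction l generalizing pre with
  | nil => simp [pvSplitP]
  | cons c rest ih =>
    by_cases hc : c = '+'
    · subst hc; simp [pvSplitP, List.takeWhile, List.dropWhile]
    · simp only [pvSplitP, if_neg hc]
      rw [ih]
      simp [hc]

theorem pvSplit_head_lt {cs base : List Char} {rest : List (List Char)}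
    (h : PySem.Chars.splitOn cs ['+'] = base :: rest) (hr : rest ≠ []) :
    base.length < cs.length := by
  rw [pvSplitOn_eq, pvSplitP_eq] at h
  cases hd : cs.dropWhile (· ≠ '+') with
  | nil =>
    rw [hd] at h; simp at h
    exact absurd h.2 hr
  | cons d ds =>
    rw [hd] at h; simp at h
    have hlen := congrArg List.length (List.takeWhile_append_dropWhile (p := (· ≠ '+')) (l := cs))
    rw [hd] at hlen; simp at hlen
    have hb : base.length = (List.takeWhile (fun x => !decide (x = '+')) cs).length := by
      rw [h.1]
    omega

-- literal port of A's to_base_mods (over char lists; strings rebuilt at the end)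
def pvToBM (ft : List Char) : List (List Char) :=
  match hbm : PySem.Chars.splitOn ft ['+'] with
  | [] => [[], []]  -- unreachable: split never returns an empty list
  | base :: rest =>
    let mods0 := (PySem.Chars.join [] rest).map (fun c => [c])
    let bm :=
      if h : mods0 ≠ [] then
        -- Try again with just the base.
        match pvToBM base with
        | b0 :: m1 :: rest2 =>
          if m1 ≠ [] then (b0, mods0 ++ (m1 :: rest2)) else (base, mods0)
        | _ => (base, mods0)  -- unreachable: A always returns ≥ 2 elements
      else (base, mods0)
    let bm2 :=
      match pvAliases.get? bm.1 with
      | some x => (x.headD [], if bm.2 ≠ [] then bm.2 ++ x.drop 1 else x.drop 1)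
      | none => bm
    let mods3 := pvKStep (pvSStep bm2.2)
    if mods3 ≠ [] then bm2.1 :: mods3 else [bm2.1, []]
termination_by ft.length
decreasing_by
  refine pvSplit_head_lt hbm (fun hnil => h ?_)
  subst hnil; simp [PySem.Chars.join, mods0, List.intercalate]

def to_base_mods (filetype : String) : List String :=
  (pvToBM filetype.toList).map (fun cs => String.ofList cs)

-- ===== PORT B =====

-- B's run collector: the elements after the key that get absorbed
def pvRun (canFollow : List Char → Bool) (atMostOne : Bool) : List (List Char) → List (List Char)
  | [] => []
  | e :: es =>
    if canFollow e then (if atMostOne then [e] else e :: pvRun canFollow atMostOne es) else []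

-- B's _absorb: merge the first occurrence of key with its following run, by slicing
def pvAbsorb (mods : List (List Char)) (key : List Char) (canFollow : List Char → Bool)
    (atMostOne : Bool) : List (List Char) :=
  match PySem.List.index? mods key with
  | none => mods
  | some i =>
    let run := pvRun canFollow atMostOne (mods.drop (i+1))
    let j := i + 1 + run.length
    mods.take i ++ [PySem.Chars.join [] ((mods.drop i).take (run.length + 1))] ++ mods.drop j

-- literal port of B's to_base_mods (over char lists; strings rebuilt at the end)
def pvToBMAlt (ft : List Char) : List (List Char) :=
  match PySem.Chars.splitOn ft ['+'] with
  | [] => [[], []]  -- unreachable: split never returns an empty list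
  | base :: rest =>
    let mods0 := (PySem.Chars.join [] rest).map (fun c => [c])
    let st :=
      match pvAliases.get? base with
      | some x => (x.headD [], mods0 ++ x.drop 1)
      | none => (base, mods0)
    let m1 := pvAbsorb st.2 ("S".toList) pvDigit false
    let m2 := pvAbsorb m1 ("k".toList) (fun e => e == "o".toList) true
    st.1 :: (if m2 ≠ [] then m2 else [[]])

def to_base_mods_alt (filetype : String) : List String :=
  (pvToBMAlt filetype.toList).map (fun cs => String.ofList cs)

-- ===== PRECONDITION & SPEC =====
def Spec_to_base_mods (filetype : String) (out : List String) : Prop := out = to_base_mods_alt filetype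
instance (filetype : String) (out : List String) : Decidable (Spec_to_base_mods filetype out) := by unfold Spec_to_base_mods; infer_instance

-- ===== CLAIM (what is proved, stated in full; the proofs are below) =====
def Claim_equal_to_base_mods : Prop := ∀ (filetype : String), Dom_to_base_mods filetype → Spec_to_base_mods filetype (to_base_mods filetype)

-- ===== LEMMAS AND PROOFS =====

-- generic list-index helpers for reasoning `set`/`eraseIdx`/`getD` across an append
theorem pvGetD_append_right {α : Type} (pre t : List α) (n : Nat) (x : α) :
    (pre ++ t).getD (pre.length + n) x = t.getD n x := by
  induction pre with
  | nil => simp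
  | cons a p ih => simpa [Nat.succ_add] using ih

theorem pvEraseIdx_append_right {α : Type} (pre t : List α) (n : Nat) :
    (pre ++ t).eraseIdx (pre.length + n) = pre ++ t.eraseIdx n := by
  rw [List.eraseIdx_append]
  simp

theorem pvSet_append_right {α : Type} (pre t : List α) (x : α) :
    (pre ++ t).set pre.length x = pre ++ t.set 0 x := by
  rw [List.set_append]
  simp

-- the common "first key absorbs its following run" shape both recombination codes compute
def pvMerge (cf : List Char → Bool) (one : Bool) (m : List Char) :
    List (List Char) → List (List Char)
  | [] => [m]
  | e :: es =>
    if cf e then (if one then (m ++ e) :: es else pvMerge cf one (m ++ e) es)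
    else m :: e :: es

-- A's S while-loop computes the greedy merge
theorem pvLoopS_spec (suf : List (List Char)) : ∀ (fuel : Nat), suf.length ≤ fuel →
    ∀ (pre : List (List Char)) (m : List Char),
    pvLoopS fuel pre.length (pre ++ m :: suf) = pre ++ pvMerge pvDigit false m suf := by
  induction suf with
  | nil =>
    intro fuel _ pre m
    cases fuel <;> simp [pvLoopS, pvMerge]
  | cons e es ih =>
    intro fuel hf pre m
    cases fuel with
    | zero => simp at hf
    | succ f =>
      rw [pvLoopS]
      have hg1 : (pre ++ m :: e :: es).getD (pre.length + 1) [] = e := by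
        rw [pvGetD_append_right]; rfl
      have hg0 : (pre ++ m :: e :: es).getD pre.length [] = m := by
        simpa using pvGetD_append_right pre (m :: e :: es) 0 []
      by_cases hd : pvDigit e = true
      · have hcond : pre.length + 1 < (pre ++ m :: e :: es).length ∧
            pvDigit ((pre ++ m :: e :: es).getD (pre.length + 1) []) = true := by
          refine ⟨by simp, by rw [hg1]; exact hd⟩
        rw [if_pos hcond]
        have hset : ((pre ++ m :: e :: es).set pre.length
            ((pre ++ m :: e :: es).getD pre.length [] ++ (pre ++ m :: e :: es).getD (pre.length + 1) [])).eraseIdx (pre.length + 1)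
            = pre ++ (m ++ e) :: es := by
          rw [hg0, hg1, pvSet_append_right]
          simpa using pvEraseIdx_append_right pre ((m ++ e) :: e :: es) 1
        rw [hset, ih f (by simp at hf; omega), pvMerge, if_pos hd]
        simp
      · rw [if_neg, pvMerge, if_neg hd]
        intro hcon
        exact hd (by rw [hg1] at hcon; exact hcon.2)

-- A's k one-step body computes the single merge
theorem pvKBody_spec (pre : List (List Char)) (m : List Char) (suf : List (List Char)) :
    (if pre.length + 1 < (pre ++ m :: suf).length ∧ (pre ++ m :: suf).getD (pre.length + 1) [] = "o".toList then
      ((pre ++ m :: suf).set pre.length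
        ((pre ++ m :: suf).getD pre.length [] ++ (pre ++ m :: suf).getD (pre.length + 1) [])).eraseIdx (pre.length + 1)
     else pre ++ m :: suf)
    = pre ++ pvMerge (fun e => e == "o".toList) true m suf := by
  cases suf with
  | nil =>
    rw [if_neg]
    · rfl
    · intro h
      have := h.1
      simp at this
  | cons e es =>
    have hg1 : (pre ++ m :: e :: es).getD (pre.length + 1) [] = e := by
      rw [pvGetD_append_right]; rfl
    have hg0 : (pre ++ m :: e :: es).getD pre.length [] = m := by
      simpa using pvGetD_append_right pre (m :: e :: es) 0 []
    by_cases he : e = "o".toList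
    · have hcond : pre.length + 1 < (pre ++ m :: e :: es).length ∧
          (pre ++ m :: e :: es).getD (pre.length + 1) [] = "o".toList := by
        refine ⟨by simp, by rw [hg1]; exact he⟩
      rw [if_pos hcond, hg0, hg1, pvSet_append_right]
      rw [pvMerge, if_pos (by simp [he])]
      simpa using pvEraseIdx_append_right pre ((m ++ e) :: e :: es) 1
    · rw [if_neg, pvMerge, if_neg (by simpa using he)]
      intro hcon
      exact he (by rw [hg1] at hcon; exact hcon.2)

-- B's run is a prefix of the suffix, and pvMerge is "key ++ run, then the rest"
theorem pvRun_take (cf : List Char → Bool) (one : Bool) (suf : List (List Char)) :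
    suf.take (pvRun cf one suf).length = pvRun cf one suf := by
  induction suf with
  | nil => simp [pvRun]
  | cons e es ih =>
    rw [pvRun]
    by_cases hc : cf e = true
    · rw [if_pos hc]
      cases one with
      | true => simp
      | false => simp [ih]
    · rw [if_neg hc]; simp

theorem pvMerge_eq_run (cf : List Char → Bool) (one : Bool) (suf : List (List Char)) :
    ∀ m, pvMerge cf one m suf
      = (m ++ (pvRun cf one suf).flatten) :: suf.drop (pvRun cf one suf).length := by
  induction suf with
  | nil => intro m; simp [pvMerge, pvRun]
  | cons e es ih =>
    intro m
    rw [pvMerge, pvRun]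
    by_cases hc : cf e = true
    · rw [if_pos hc, if_pos hc]
      cases one with
      | true => simp
      | false => rw [ih]; simp
    · rw [if_neg hc, if_neg hc]; simp

theorem pvJoin0_flatten (l : List (List Char)) : PySem.Chars.join [] l = l.flatten := by
  induction l with
  | nil => simp [PySem.Chars.join_nil]
  | cons a t ih =>
    cases t with
    | nil => simp [PySem.Chars.join_singleton]
    | cons b t2 =>
      rw [PySem.Chars.join_cons_cons]
      rw [ih]
      simp

-- B's slice-based absorb on the decomposition exposed by index?
theorem pvAbsorb_decomp (pre suf : List (List Char)) (key : List Char)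
    (cf : List Char → Bool) (one : Bool) (hk : key ∉ pre) :
    pvAbsorb (pre ++ key :: suf) key cf one = pre ++ pvMerge cf one key suf := by
  have hidx : PySem.List.index? (pre ++ key :: suf) key = some pre.length :=
    (PySem.List.index?_eq_some_iff _ _ _).mpr ⟨pre, suf, rfl, rfl, hk⟩
  rw [pvAbsorb, hidx]
  have hdrop1 : (pre ++ key :: suf).drop (pre.length + 1) = suf := by
    rw [List.drop_append]
    rw [show pre.length + 1 - pre.length = 1 by omega]
    rw [List.drop_eq_nil_of_le (by omega)]
    simp
  have hdrop0 : (pre ++ key :: suf).drop pre.length = key :: suf := by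
    rw [List.drop_append]
    rw [show pre.length - pre.length = 0 by omega]
    rw [List.drop_eq_nil_of_le (by omega)]
    simp
  have htake : (pre ++ key :: suf).take pre.length = pre := by
    simp
  simp only [hdrop1, hdrop0, htake]
  set run := pvRun cf one suf with hrun
  have htk : (key :: suf).take (run.length + 1) = key :: run := by
    simp [List.take_succ_cons, hrun, pvRun_take]
  have hdr : (pre ++ key :: suf).drop (pre.length + 1 + run.length) = suf.drop run.length := by
    rw [List.drop_append]
    rw [show pre.length + 1 + run.length - pre.length = run.length + 1 by omega]
    rw [List.drop_eq_nil_of_le (by omega), List.drop_succ_cons]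
    simp
  rw [htk, hdr, pvJoin0_flatten, pvMerge_eq_run]
  simp [hrun]

-- A's two recombination steps equal B's two absorbs, on every list
theorem pvSStep_eq (mods : List (List Char)) :
    pvSStep mods = pvAbsorb mods ("S".toList) pvDigit false := by
  cases hidx : PySem.List.index? mods ("S".toList) with
  | none => rw [pvSStep, hidx, pvAbsorb, hidx]
  | some i =>
    obtain ⟨pre, suf, hdec, hlen, hnm⟩ := (PySem.List.index?_eq_some_iff _ _ _).mp hidx
    subst hdec; subst hlen
    rw [pvSStep, hidx, pvAbsorb_decomp _ _ _ _ _ hnm]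
    exact pvLoopS_spec suf _ (by simp; omega) pre _

theorem pvKStep_eq (mods : List (List Char)) :
    pvKStep mods = pvAbsorb mods ("k".toList) (fun e => e == "o".toList) true := by
  cases hidx : PySem.List.index? mods ("k".toList) with
  | none => rw [pvKStep, hidx, pvAbsorb, hidx]
  | some i =>
    obtain ⟨pre, suf, hdec, hlen, hnm⟩ := (PySem.List.index?_eq_some_iff _ _ _).mp hidx
    subst hdec; subst hlen
    rw [pvKStep, hidx, pvAbsorb_decomp _ _ _ _ _ hnm]
    exact pvKBody_spec pre _ suf


-- the 17 alias values, and the facts the ports need about them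
def pvAliasVals : List (List (List Char)) :=
  [ ["binary".toList, "S".toList, "w".toList]
  , ["text".toList, "C".toList]
  , ["text".toList, "C".toList, "x".toList]
  , ["text".toList, "k".toList]
  , ["text".toList, "k".toList, "x".toList]
  , ["text".toList, "F".toList]
  , ["binary".toList, "F".toList, "S".toList, "w".toList]
  , ["binary".toList, "F".toList]
  , ["resource".toList, "F".toList]
  , ["binary".toList, "F".toList, "x".toList]
  , ["binary".toList, "x".toList]
  , ["text".toList, "F".toList, "x".toList]
  , ["binary".toList, "S".toList, "w".toList, "x".toList]
  , ["text".toList, "x".toList]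
  , ["unicode".toList, "x".toList]
  , ["utf16".toList, "x".toList]
  , ["utf8".toList, "x".toList] ]

theorem pvAlias_val_mem (b : List Char) (x : List (List Char))
    (h : pvAliases.get? b = some x) : x ∈ pvAliasVals := by
  rw [PySem.Dict.get?] at h
  cases hf : List.find? (fun p => p.1 == b) pvAliases.items with
  | none => rw [hf] at h; simp at h
  | some p =>
    rw [hf] at h; simp at h
    have hp : p ∈ pvAliases.items := List.mem_of_find?_eq_some hf
    rw [show pvAliases.items = List.zip (pvAliases.keys) pvAliasVals from by decide] at hp
    have := List.of_mem_zip hp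
    rw [← h]
    exact this.2

theorem pvAlias_props (x : List (List Char)) (hx : x ∈ pvAliasVals) :
    pvSStep (x.drop 1) = x.drop 1 ∧ pvKStep (x.drop 1) = x.drop 1 ∧
    pvAliases.get? (x.headD []) = none ∧ x.drop 1 ≠ [] ∧ (x.drop 1).headD [] ≠ [] := by
  fin_cases hx <;> exact (by decide)

-- split facts: the base contains no '+', and splitting a '+'-free string is trivial
theorem pvSplit_head_no_plus {cs base : List Char} {rest : List (List Char)}
    (h : PySem.Chars.splitOn cs ['+'] = base :: rest) : '+' ∉ base := by
  rw [pvSplitOn_eq, pvSplitP_eq] at h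
  have hb : base = cs.takeWhile (fun x => !decide (x = '+')) := by
    have := (List.cons.injEq _ _ _ _).mp h
    simpa using this.1.symm
  intro hmem
  rw [hb] at hmem
  have := List.mem_takeWhile_imp hmem
  simp at this

theorem pvSplitOn_no_plus (l : List Char) (hb : '+' ∉ l) :
    PySem.Chars.splitOn l ['+'] = [l] := by
  rw [pvSplitOn_eq, pvSplitP_eq]
  have ht : l.takeWhile (fun x => decide (x ≠ '+')) = l := by
    rw [List.takeWhile_eq_self_iff]
    intro a ha
    simp
    exact fun hc => hb (hc ▸ ha)
  have hd : l.dropWhile (fun x => decide (x ≠ '+')) = [] := by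
    rw [List.dropWhile_eq_nil_iff]
    intro a ha
    simp
    exact fun hc => hb (hc ▸ ha)
  simp only [ht, hd]
  simp

-- evaluating A's recursive call on the '+'-free base
theorem pvToBM_no_plus_none (base : List Char) (hb : '+' ∉ base)
    (hn : pvAliases.get? base = none) : pvToBM base = [base, []] := by
  rw [pvToBM.eq_def]
  split
  · rename_i heq
    rw [pvSplitOn_no_plus base hb] at heq
    cases heq
  · rename_i base' rest' heq
    rw [pvSplitOn_no_plus base hb] at heq
    injection heq with h1 h2
    subst h1; subst h2
    simp only [PySem.Chars.join_nil, List.map_nil]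
    rw [dif_neg (by simp)]
    rw [hn]
    simp [pvSStep, pvKStep, PySem.List.index?]

theorem pvToBM_no_plus_some (base : List Char) (x : List (List Char)) (hb : '+' ∉ base)
    (hs : pvAliases.get? base = some x) :
    pvToBM base = x.headD [] :: x.drop 1 := by
  obtain ⟨hS, hK, _, hne, _⟩ := pvAlias_props x (pvAlias_val_mem base x hs)
  rw [pvToBM.eq_def]
  split
  · rename_i heq
    rw [pvSplitOn_no_plus base hb] at heq
    cases heq
  · rename_i base' rest' heq
    rw [pvSplitOn_no_plus base hb] at heq
    injection heq with h1 h2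
    subst h1; subst h2
    simp only [PySem.Chars.join_nil, List.map_nil]
    rw [dif_neg (by simp)]
    rw [hs]
    simp only [List.drop_one] at hS hK hne
    simp [hS, hK, hne]

theorem pvCore_eq (ft : List Char) : pvToBM ft = pvToBMAlt ft := by
  rw [pvToBM.eq_def, pvToBMAlt.eq_def]
  split
  · rename_i heq
    rw [heq]
  · rename_i base rest heq
    rw [heq]
    have hnp : '+' ∉ base := pvSplit_head_no_plus heq
    simp only []
    by_cases hm : ((PySem.Chars.join [] rest).map (fun c : Char => [c])) = []
    · rw [dif_neg (by simpa using hm)]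
      cases hal : pvAliases.get? base with
      | none =>
        simp [hm, pvSStep_eq, pvKStep_eq]
        split_ifs with h <;> simp [h]
      | some x =>
        simp [hm, pvSStep_eq, pvKStep_eq]
        split_ifs with h <;> simp [h]
    · rw [dif_pos (by simpa using hm)]
      cases hal : pvAliases.get? base with
      | none =>
        rw [pvToBM_no_plus_none base hnp hal]
        simp [hal, pvSStep_eq, pvKStep_eq]
        split_ifs with h <;> simp [h]
      | some x =>
        obtain ⟨_, _, hnone, hne, hhd⟩ := pvAlias_props x (pvAlias_val_mem base x hal)
        rw [pvToBM_no_plus_some base x hnp hal]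
        cases hxd : x.drop 1 with
        | nil => exact absurd hxd hne
        | cons m1 r2 =>
          rw [hxd] at hhd
          simp only [List.headD_cons] at hhd
          have hnone' : pvAliases.get? (x.head?.getD []) = none := by simpa using hnone
          have hxd' : x.tail = m1 :: r2 := by simpa using hxd
          simp [hhd, hnone', hxd', hal, pvSStep_eq, pvKStep_eq]
          split_ifs with h <;> simp [h]

-- ===== VERDICT (by name: the statement is the Claim_ definition above) =====
theorem to_base_mods_spec : Claim_equal_to_base_mods := by
  intro ft _
  unfold Spec_to_base_mods to_base_mods to_base_mods_alt
  rw [pvCore_eq]
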